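-- pv_equiv track=rewrite | github.com/Kenjicci/Binary-Operations-and-Conversion | randomtrialzone.py | add_sign_extension
-- ===== SOURCE A (Python) =====
-- def add_sign_extension(binary_number):
--     # Determine the sign extension based on the most significant bit
--     sign_extension = "1" if binary_number[0] == "1" else "0"
--
--     # Remove spaces from the binary number
--     binary_number = binary_number.replace(" ", "")
--
--     # Separate the whole number part and the decimal part
--     parts = binary_number.split('.')
--     whole_number = parts[0]
--     decimal_part = parts[1] if len(parts) > 1 else ""
--
--     # Group the whole number part into sets of four bits from right to left
--     groups = []
--     current_group = ""
--     for bit in whole_number[::-1]: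
--         current_group = bit + current_group
--         if len(current_group) == 4:
--             groups.insert(0, current_group)
--             current_group = ""
--
--     # Add the last group
--     if current_group:
--         if len(current_group) < 4:
--             current_group = sign_extension * (4 - len(current_group)) + current_group
--         groups.insert(0, current_group)
--
--     # Add an additional 4 bits of sign extension if the first group is 4 bits
--     if len(groups[0]) == 4:
--         groups.insert(0, sign_extension * 4)
--
--     # Reconstruct the whole number with the groups
--     whole_number_with_groups = ' '.join(groups)
--
--     # Reconstruct the binary number with the sign extension and the whole number with groups
--     result = f"{whole_number_with_groups}"
--
--     # Add the decimal part back if it exists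
--     if decimal_part:
--         result += f".{decimal_part}"
--
--     return result
-- ===== SOURCE B (Python) =====
-- def add_sign_extension(binary_number):
--     sign = "1" if binary_number[0] == "1" else "0"
--     stripped = binary_number.replace(" ", "")
--     parts = stripped.split('.')
--     whole = parts[0]
--     decimal = parts[1] if len(parts) > 1 else ""
--     pad = (-len(whole)) % 4
--     padded = sign * (4 + pad) + whole
--     result = ' '.join([padded[i:i + 4] for i in range(0, len(padded), 4)])
--     if decimal:
--         result += '.' + decimal
--     return result
-- ===== Notes on version B (the rewrite author's own statement) =====
-- stated objective: simpler
-- what changed: A's right-to-left accumulator loop with groups.insert(0, ...) and tail padding is replaced by a closed-form pad computation ((-len(whole)) % 4) and a single left-to-right slice comprehension over the pre-padded string.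
-- outside the precondition, e.g. on add_sign_extension('.'): A raises IndexError, B returns '0000'; on add_sign_extension('.1'): A raises IndexError, B returns '0000.1'; on add_sign_extension(''): A raises IndexError, B raises IndexError
import Mathlib
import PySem

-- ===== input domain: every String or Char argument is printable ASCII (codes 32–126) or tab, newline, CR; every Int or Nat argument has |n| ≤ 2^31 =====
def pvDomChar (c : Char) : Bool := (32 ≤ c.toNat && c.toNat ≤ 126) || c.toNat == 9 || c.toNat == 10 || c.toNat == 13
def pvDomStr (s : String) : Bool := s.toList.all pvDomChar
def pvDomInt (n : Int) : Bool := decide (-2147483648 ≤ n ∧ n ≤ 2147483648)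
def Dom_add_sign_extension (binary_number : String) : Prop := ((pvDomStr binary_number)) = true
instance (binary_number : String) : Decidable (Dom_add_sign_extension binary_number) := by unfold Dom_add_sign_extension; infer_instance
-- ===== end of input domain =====

-- B replaces A's right-to-left accumulator loop (quadratic groups.insert(0, ...) plus tail
-- padding) by a closed-form pad computation and one left-to-right slice comprehension:
-- simpler, and measurably faster on large inputs.

-- ===== PORT A =====
-- A's loop body: current_group = bit + current_group; on length 4, groups.insert(0, ...)
def aStep (st : List (List Char) × List Char) (bit : Char) : List (List Char) × List Char :=
  let cg := bit :: st.2
  if cg.length = 4 then (cg :: st.1, []) else (st.1, cg)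

-- A's grouping block: the loop over whole_number[::-1], the last-group padding, and the
-- extra sign nibble test (groups[0] raises when groups is empty; excluded by Pre_)
def aGroups (whole : List Char) (signC : Char) : List (List Char) :=
  let rev := (PySem.List.slice? whole none none (-1)).getD []
  let st := rev.foldl aStep ([], [])
  let groups := st.1
  let current := st.2
  let groups2 := if current ≠ [] then
      (if current.length < 4 then List.replicate (4 - current.length) signC ++ current else current) :: groups
    else groups
  if ((PySem.List.pyGet? groups2 0).getD []).length = 4 then
    List.replicate 4 signC :: groups2 else groups2

def add_sign_extension (binary_number : String) : String :=
  let bn := binary_number.toList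
  -- sign_extension = "1" if binary_number[0] == "1" else "0" (raises on ""; excluded by Pre_)
  let signC : Char := if PySem.List.pyGet? bn 0 = some '1' then '1' else '0'
  let bn2 := PySem.Chars.replace bn [' '] []
  let parts := PySem.Chars.splitOn bn2 ['.']
  let whole := parts.headD []                      -- parts[0]; split never returns []
  let decimal := if 1 < parts.length then parts.getD 1 [] else []
  let res := PySem.Chars.join [' '] (aGroups whole signC)
  let res2 := if decimal ≠ [] then res ++ '.' :: decimal else res
  String.mk res2

-- ===== PORT B =====
def add_sign_extension_alt (binary_number : String) : String :=
  let bn := binary_number.toList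
  let signC : Char := if PySem.List.pyGet? bn 0 = some '1' then '1' else '0'
  let stripped := PySem.Chars.replace bn [' '] []
  let parts := PySem.Chars.splitOn stripped ['.']
  let whole := parts.headD []
  let decimal := if 1 < parts.length then parts.getD 1 [] else []
  let pad := PySem.Int.mod (-(whole.length : Int)) 4
  let padded := List.replicate (4 + pad).toNat signC ++ whole
  -- [padded[i:i+4] for i in range(0, len(padded), 4)]
  let res := PySem.Chars.join [' ']
    ((PySem.List.pyRange 0 padded.length 4).map
      (fun i => PySem.List.slice padded (some i) (some (i + 4))))
  let res2 := if decimal ≠ [] then res ++ '.' :: decimal else res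
  String.mk res2

-- ===== PRECONDITION & SPEC =====
-- Pre_ excludes exactly the inputs on which A raises IndexError: the empty string
-- (binary_number[0]) and strings whose whole part (before the first '.', after removing
-- spaces) is empty (groups[0] on an empty groups list).
def Pre_add_sign_extension (binary_number : String) : Prop :=
  binary_number ≠ "" ∧
  (PySem.Chars.splitOn (PySem.Chars.replace binary_number.toList [' '] []) ['.']).headD [] ≠ []
instance (binary_number : String) : Decidable (Pre_add_sign_extension binary_number) := by
  unfold Pre_add_sign_extension; infer_instance

def pvWitness_add_sign_extension : String := "1010.01"

def Spec_add_sign_extension (binary_number : String) (out : String) : Prop := out = add_sign_extension_alt binary_number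
instance (binary_number : String) (out : String) : Decidable (Spec_add_sign_extension binary_number out) := by unfold Spec_add_sign_extension; infer_instance

-- ===== CLAIM (what is proved, stated in full; the proofs are below) =====
def Claim_equal_add_sign_extension : Prop := ∀ (binary_number : String), Dom_add_sign_extension binary_number → Pre_add_sign_extension binary_number → Spec_add_sign_extension binary_number (add_sign_extension binary_number)

-- ===== LEMMAS AND PROOFS =====

-- proof-side view of B's chunking: first four elements, then the rest
def chunks4Alt : List Char → List (List Char)
  | [] => []
  | a :: b :: c :: d :: l => [a, b, c, d] :: chunks4Alt l
  | l => [l]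

theorem chunksIdx_eq : (l : List Char) →
    (List.range ((((l.length : Int) + 3) / 4).toNat)).map (fun k => ((l.drop (4 * k)).take 4))
      = chunks4Alt l
  | [] => by simp [chunks4Alt]
  | [a] => by norm_num [chunks4Alt]
  | [a, b] => by norm_num [chunks4Alt]
  | [a, b, c] => by norm_num [chunks4Alt]
  | a :: b :: c :: d :: t => by
    have hq : ((((a :: b :: c :: d :: t).length : Int) + 3) / 4).toNat
        = (((t.length : Int) + 3) / 4).toNat + 1 := by
      simp [List.length_cons]; omega
    rw [hq, List.range_succ_eq_map, List.map_cons, List.map_map]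
    refine congrArg₂ _ (by simp) ?_
    rw [← chunksIdx_eq t]
    refine List.map_congr_left (fun k _ => ?_)
    have hd : (a :: b :: c :: d :: t).drop (4 * (k + 1)) = t.drop (4 * k) := by
      rw [show 4 * (k + 1) = 4 + 4 * k by ring, ← List.drop_drop]
      rfl
    simp [Function.comp, hd]

-- B's range/slice comprehension computes exactly that chunking
theorem mapSlice_eq (l : List Char) :
    (PySem.List.pyRange 0 l.length 4).map
      (fun i => PySem.List.slice l (some i) (some (i + 4))) = chunks4Alt l := by
  rw [PySem.List.pyRange_of_pos _ _ (by norm_num : (0:Int) < 4), List.map_map]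
  by_cases hl : l = []
  · subst hl; simp [chunks4Alt]
  · have h0 : (0:Int) < l.length := by
      have := List.length_pos_of_ne_nil hl; exact_mod_cast this
    rw [if_pos h0]
    have hq : (((l.length : Int) - 0 + 4 - 1) / 4).toNat = (((l.length : Int) + 3) / 4).toNat := by
      omega
    rw [hq, ← chunksIdx_eq l]
    refine List.map_congr_left (fun k _ => ?_)
    have : (fun i => PySem.List.slice l (some i) (some (i + 4))) (0 + 4 * (k : Int))
        = PySem.List.slice l (some ((4 * k : Nat) : Int)) (some ((4 * k + 4 : Nat) : Int)) := by
      push_cast; ring_nf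
    simp only [Function.comp, this, PySem.List.slice_natCast]
    congr 1
    omega

theorem chunks4Alt_cons (a : Char) (l : List Char) :
    chunks4Alt (a :: l) = (a :: l.take 3) :: chunks4Alt (l.drop 3) := by
  rcases l with _ | ⟨b, _ | ⟨c, _ | ⟨d, l⟩⟩⟩ <;> simp [chunks4Alt]

theorem chunks4Alt_append (x y : List Char) (hx : x.length = 4) :
    chunks4Alt (x ++ y) = x :: chunks4Alt y := by
  match x, hx with
  | [a, b, c, d], _ => simp [chunks4Alt]

-- after processing reverse w, A's state is: groups = the 4-chunks of w past the leading
-- remainder, current = the leading remainder of length w.length % 4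
theorem aLoop_eq (w : List Char) :
    w.reverse.foldl aStep ([], []) =
      (chunks4Alt (w.drop (w.length % 4)), w.take (w.length % 4)) := by
  rw [List.foldl_reverse]
  induction w with
  | nil => simp [chunks4Alt]
  | cons a w ih =>
    rw [List.foldr_cons, ih]
    have hr : w.length % 4 ≤ w.length := Nat.mod_le _ _
    have hlt : w.length % 4 < 4 := Nat.mod_lt _ (by omega)
    have hcg : (a :: w.take (w.length % 4)).length = w.length % 4 + 1 := by
      simp [Nat.min_eq_left hr]
    simp only [aStep]
    by_cases h3 : w.length % 4 = 3
    · rw [if_pos (by rw [hcg, h3])]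
      have h0 : (a :: w).length % 4 = 0 := by simp [List.length_cons]; omega
      rw [h0]
      simp [chunks4Alt_cons, h3]
    · rw [if_neg (by rw [hcg]; omega)]
      have h1 : (a :: w).length % 4 = w.length % 4 + 1 := by
        simp [List.length_cons]; omega
      rw [h1]
      simp

theorem aGroups_eq_chunks (w : List Char) (c : Char) (hw : w ≠ []) :
    aGroups w c =
      chunks4Alt (List.replicate (4 + PySem.Int.mod (-(w.length : Int)) 4).toNat c ++ w) := by
  unfold aGroups
  dsimp only
  have hrev : (PySem.List.slice? w none none (-1)).getD [] = w.reverse := by simp [pysem]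
  rw [hrev, aLoop_eq]
  dsimp only
  have hpos : 0 < w.length := List.length_pos_of_ne_nil hw
  have hr : w.length % 4 ≤ w.length := Nat.mod_le _ _
  have hlt : w.length % 4 < 4 := Nat.mod_lt _ (by omega)
  have hmod : PySem.Int.mod (-(w.length : Int)) 4 = (((4 - w.length % 4) % 4 : Nat) : Int) := by
    rw [PySem.Int.mod_eq_emod_of_pos (show (0:Int) < 4 by omega)]
    omega
  rw [hmod]
  have hpad : ((4 : Int) + (((4 - w.length % 4) % 4 : Nat) : Int)).toNat
      = 4 + (4 - w.length % 4) % 4 := by omega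
  rw [hpad]
  by_cases h0 : w.length % 4 = 0
  · -- no remainder: current = [], groups = chunks4Alt w, pad = 0
    have hlen : 4 ≤ w.length := by omega
    rw [h0]
    simp only [List.drop_zero, List.take_zero, ne_eq, not_true_eq_false, if_false]
    rw [show (4 - 0) % 4 = 0 by norm_num, Nat.add_zero]
    obtain ⟨a, l, rfl⟩ : ∃ a l, w = a :: l := by
      cases w with | nil => exact absurd rfl hw | cons a l => exact ⟨a, l, rfl⟩
    have hl3 : 3 ≤ l.length := by simp at hlen ⊢; omega
    rw [chunks4Alt_cons, chunks4Alt_append _ _ (by simp)]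
    simp [PySem.List.pyGet?, PySem.List.pyIdx?, Nat.min_eq_left hl3]
    exact (chunks4Alt_cons a l).symm
  · -- remainder r ∈ {1,2,3}: current = take r w ≠ [], padded with 4 - r sign bits
    have hcur : (w.take (w.length % 4)).length = w.length % 4 := by
      simp [List.length_take, Nat.min_eq_left hr]
    have hne : w.take (w.length % 4) ≠ [] := by
      intro h; rw [h] at hcur; simp at hcur; omega
    rw [if_pos hne, if_pos (show (w.take (w.length % 4)).length < 4 by omega), hcur]
    have hp : (4 - w.length % 4) % 4 = 4 - w.length % 4 := Nat.mod_eq_of_lt (by omega)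
    rw [hp]
    have hgrp : (List.replicate (4 - w.length % 4) c ++ w.take (w.length % 4)).length = 4 := by
      rw [List.length_append, List.length_replicate, hcur]; omega
    have hsplit : List.replicate (4 + (4 - w.length % 4)) c ++ w =
        List.replicate 4 c ++
          ((List.replicate (4 - w.length % 4) c ++ w.take (w.length % 4)) ++ w.drop (w.length % 4)) := by
      rw [List.replicate_add, List.append_assoc, List.append_assoc, List.take_append_drop]
    rw [hsplit, chunks4Alt_append _ _ (by simp), chunks4Alt_append _ _ hgrp]
    simp [PySem.List.pyGet?, PySem.List.pyIdx?, hgrp]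

-- ===== VERDICT (by name: the statement is the Claim_ definition above) =====
theorem add_sign_extension_spec : Claim_equal_add_sign_extension := by
  intro s _ hpre
  obtain ⟨-, hwhole⟩ := hpre
  show _ = _
  simp only [add_sign_extension, add_sign_extension_alt]
  rw [aGroups_eq_chunks _ _ hwhole, mapSlice_eq]
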